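-- pv_equiv track=rewrite | github.com/boostcamp-5th-NLP05/programmers-study | yunjin/3_숫자게임.py | solution
-- ===== SOURCE A (Python) =====
-- def solution(A, B):
--
--     answer = 0
--
--     # 내림차순 정렬
--     A.sort(reverse=True)
--     B.sort(reverse=True)
--
--     b_idx = 0
--
--     for a_idx in range(len(A)):
--
--         # B가 크면 A, B 둘다 인덱스 증가
--         if B[b_idx] > A[a_idx]:
--             answer += 1 # 승점 획득
--             b_idx += 1
--
--         # B가 작은 경우
--         else:
--
--             # B의 가장 작은 수를
--             tmp = B.pop()
--
--             # 넣어줘서 가장 작은 패로 패배를 하도록 함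
--             B.insert(b_idx, tmp)
--             b_idx += 1
--
--     return answer
-- ===== SOURCE B (Python) =====
-- def solution(A, B):
--     a_desc = sorted(A, reverse=True)
--     b_desc = sorted(B, reverse=True)
--     wins = 0
--     i = 0  # pointer into b_desc, advances only on a win
--     for a in a_desc:
--         if i < len(b_desc) and b_desc[i] > a:
--             wins += 1
--             i += 1
--     return wins
-- ===== Notes on version B (the rewrite author's own statement) =====
-- stated objective: alternative
-- what changed: Replaces the in-place pop/insert simulation on B (each insert a linear list shift) with a pure two-pointer greedy scan over the two descending-sorted copies, and B no longer mutates its arguments.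
import Mathlib
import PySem

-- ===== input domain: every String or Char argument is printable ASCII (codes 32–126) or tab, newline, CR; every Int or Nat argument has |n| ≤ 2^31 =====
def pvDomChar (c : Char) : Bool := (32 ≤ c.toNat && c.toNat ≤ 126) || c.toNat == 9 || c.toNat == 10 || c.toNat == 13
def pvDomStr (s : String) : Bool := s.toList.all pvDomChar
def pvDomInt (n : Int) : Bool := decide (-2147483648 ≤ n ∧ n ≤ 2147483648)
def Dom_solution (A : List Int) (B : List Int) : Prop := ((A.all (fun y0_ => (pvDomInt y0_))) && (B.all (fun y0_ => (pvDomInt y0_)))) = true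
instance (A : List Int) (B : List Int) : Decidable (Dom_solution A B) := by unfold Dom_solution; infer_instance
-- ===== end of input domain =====

-- B replaces A's in-place pop/insert simulation on B with a pure two-pointer greedy scan
-- over the two descending-sorted copies (objective: alternative algorithm, no mutation).
-- NOTE on side effects: the Python A sorts both argument lists in place and reshuffles B;
-- the Python B does not mutate its arguments. The equivalence proved here is about the
-- RETURN value only.

-- ===== PORT A =====
-- The 'for a_idx in range(len(A))' loop reads A[a_idx] for a_idx = 0..len(A)-1 in order and
-- never mutates A, so it is transliterated as structural recursion over the sorted list's
-- elements; state (answer, b_idx, B-list) exactly as in the Python, 'none' = IndexError.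
def popInsertLoop (ans : Int) (bidx : Int) (Bl : List Int) : List Int → Option Int
  | [] => some ans
  | a :: rest =>
    match PySem.List.pyGet? Bl bidx with
    | none => none                                   -- B[b_idx] raises IndexError
    | some bv =>
      if bv > a then popInsertLoop (ans + 1) (bidx + 1) Bl rest
      else
        match PySem.List.pop? Bl with
        | none => none                               -- B.pop() on empty list raises
        | some (tmp, Bl') =>
          popInsertLoop ans (bidx + 1) (PySem.List.insert Bl' bidx tmp) rest

def solution (A : List Int) (B : List Int) : Int :=
  let As := PySem.List.sorted A (fun x => x) true
  let Bs := PySem.List.sorted B (fun x => x) true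
  match popInsertLoop 0 0 Bs As with
  | some ans => ans
  | none => 0                                        -- unreachable inside Pre_ (A raises there)

-- ===== PORT B =====
def twoPtrLoop (Bs : List Int) : List Int → Nat → Int → Int
  | [], _, wins => wins
  | a :: rest, i, wins =>
    if i < Bs.length ∧ Bs.getD i 0 > a then twoPtrLoop Bs rest (i + 1) (wins + 1)
    else twoPtrLoop Bs rest i wins

def solution_alt (A : List Int) (B : List Int) : Int :=
  let As := PySem.List.sorted A (fun x => x) true
  let Bs := PySem.List.sorted B (fun x => x) true
  twoPtrLoop Bs As 0 0

-- ===== PRECONDITION & SPEC =====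
-- Pre_ excludes exactly the inputs where A raises IndexError: when len(A) > len(B),
-- B[b_idx] (b_idx = a_idx) runs past the end of B.
def Pre_solution (A : List Int) (B : List Int) : Prop := A.length ≤ B.length
instance (A : List Int) (B : List Int) : Decidable (Pre_solution A B) := by
  unfold Pre_solution; infer_instance

def pvWitness_solution : List Int × List Int := ([1, 5], [2, 3, 4])

def Spec_solution (A : List Int) (B : List Int) (out : Int) : Prop := out = solution_alt A B
instance (A : List Int) (B : List Int) (out : Int) : Decidable (Spec_solution A B out) := by
  unfold Spec_solution; infer_instance

-- ===== CLAIM (what is proved, stated in full; the proofs are below) =====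
def Claim_equal_solution : Prop :=
  ∀ (A : List Int) (B : List Int), Dom_solution A B → Pre_solution A B →
    Spec_solution A B (solution A B)

-- ===== LEMMAS AND PROOFS =====

-- Loop invariant: after k steps of A's loop, b_idx = k, the list is P ++ S with |P| = k
-- (the frozen prefix), and the live suffix S is a prefix of Bs.drop i where i is B's
-- two-pointer position; A's comparison reads the head of S, which equals Bs[i].
lemma popInsert_eq_twoPtr (Bs : List Int) :
    ∀ (as P S : List Int) (i : Nat) (ans : Int),
      S <+: Bs.drop i → as.length ≤ S.length →
      popInsertLoop ans (↑P.length) (P ++ S) as = some (twoPtrLoop Bs as i ans) := by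
  intro as
  induction as with
  | nil => intro P S i ans _ _; simp [popInsertLoop, twoPtrLoop]
  | cons a rest ih =>
    intro P S i ans hpre hlen
    cases S with
    | nil => simp at hlen
    | cons b S' =>
      obtain ⟨t, ht⟩ := hpre
      have hi : i < Bs.length := by
        by_contra h
        push_neg at h
        rw [List.drop_eq_nil_of_le h] at ht
        simp at ht
      have h0 : Bs[i]? = some b := by
        rw [← List.head?_drop, ← ht]; rfl
      have hb : Bs.getD i 0 = b := by
        simp [List.getD_eq_getElem?_getD, h0]
      simp only [popInsertLoop, PySem.List.pyGet?_append_length]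
      by_cases hba : b > a
      · -- win: both pointers advance
        rw [if_pos hba]
        have hpre' : S' <+: Bs.drop (i + 1) := by
          refine ⟨t, ?_⟩
          rw [← List.tail_drop, ← ht]
          rfl
        have hlen' : rest.length ≤ S'.length := by simp at hlen; omega
        have e2 : (↑P.length + 1 : Int) = ↑((P ++ [b]).length) := by push_cast [List.length_append, List.length_cons, List.length_nil]; ring
        have step := ih (P ++ [b]) S' (i + 1) (ans + 1) hpre' hlen'
        rw [show P ++ b :: S' = (P ++ [b]) ++ S' by simp, e2, step]
        have hcond : i < Bs.length ∧ Bs.getD i 0 > a := ⟨hi, by rw [hb]; exact hba⟩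
        simp only [twoPtrLoop, if_pos hcond]
      · -- loss: A burns its smallest card (pop last, insert at b_idx); B's pointer stays
        rw [if_neg hba]
        have hne : (b :: S') ≠ [] := by simp
        have hsplit : P ++ b :: S'
            = (P ++ (b :: S').dropLast) ++ [(b :: S').getLast hne] := by
          rw [List.append_assoc, List.dropLast_concat_getLast hne]
        rw [hsplit, PySem.List.pop?_last]
        dsimp only
        have hplen : P.length ≤ (P ++ (b :: S').dropLast).length := by simp
        rw [PySem.List.insert_natCast _ _ _ hplen, List.take_left, List.drop_left]
        have hpre' : (b :: S').dropLast <+: Bs.drop i :=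
          List.IsPrefix.trans (List.dropLast_prefix _) ⟨t, ht⟩
        have hlen' : rest.length ≤ (b :: S').dropLast.length := by
          simp at hlen ⊢; omega
        have e2 : (↑P.length + 1 : Int) = ↑((P ++ [(b :: S').getLast hne]).length) := by
          push_cast [List.length_append, List.length_cons, List.length_nil]; ring
        have step := ih (P ++ [(b :: S').getLast hne]) ((b :: S').dropLast) i ans hpre' hlen'
        rw [show P ++ (b :: S').getLast hne :: (b :: S').dropLast
              = (P ++ [(b :: S').getLast hne]) ++ (b :: S').dropLast by simp, e2, step]
        have hcond : ¬ (i < Bs.length ∧ Bs.getD i 0 > a) := by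
          rintro ⟨_, hgt⟩; rw [hb] at hgt; exact hba hgt
        simp only [twoPtrLoop, if_neg hcond]

-- ===== VERDICT (by name: the statement is the Claim_ definition above) =====
theorem solution_spec : Claim_equal_solution := by
  intro A B _ hpre
  unfold Spec_solution solution solution_alt
  have hlenA : (PySem.List.sorted A (fun x => x) true).length = A.length :=
    PySem.List.length_sorted A _ true
  have hlenB : (PySem.List.sorted B (fun x => x) true).length = B.length :=
    PySem.List.length_sorted B _ true
  have := popInsert_eq_twoPtr (PySem.List.sorted B (fun x => x) true)
    (PySem.List.sorted A (fun x => x) true) []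
    (PySem.List.sorted B (fun x => x) true) 0 0
    (by simp) (by rw [hlenA, hlenB]; exact hpre)
  simp only [List.length_nil, Nat.cast_zero, List.nil_append] at this
  simp only [this]
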